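-- pv_equiv track=rewrite | github.com/ta-data-mad/prework-datamad-apocalypsis-exercise | Functionapocalipsis.py | balas
-- ===== SOURCE A (Python) =====
-- def balas(cargadores, armas):
--     listaparacomparar = []
--     listacargadores = list(cargadores)
--     total = 0
--     for i in listacargadores:
--         if i in armas:
--             listaparacomparar.append(i)
--     for i in listaparacomparar:
--         if i in cargadores:
--             suma = sum(cargadores[i])
--             total+=suma
--     return total
-- ===== SOURCE B (Python) =====
-- def balas(cargadores, armas):
--     # Iterate the deduplicated weapons and index into the charger dict,
--     # instead of scanning charger keys and testing membership in armas.
--     return sum(sum(cargadores[w]) for w in set(armas) if w in cargadores)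
-- ===== Notes on version B (the rewrite author's own statement) =====
-- stated objective: faster
-- what changed: B inverts the iteration: instead of scanning charger keys, testing linear membership in armas, collecting a match list and then summing, it iterates the deduplicated weapon set once and adds sum(cargadores[w]) for each weapon present in the dict via an O(1) hash lookup, as a single comprehension.
import Mathlib
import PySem

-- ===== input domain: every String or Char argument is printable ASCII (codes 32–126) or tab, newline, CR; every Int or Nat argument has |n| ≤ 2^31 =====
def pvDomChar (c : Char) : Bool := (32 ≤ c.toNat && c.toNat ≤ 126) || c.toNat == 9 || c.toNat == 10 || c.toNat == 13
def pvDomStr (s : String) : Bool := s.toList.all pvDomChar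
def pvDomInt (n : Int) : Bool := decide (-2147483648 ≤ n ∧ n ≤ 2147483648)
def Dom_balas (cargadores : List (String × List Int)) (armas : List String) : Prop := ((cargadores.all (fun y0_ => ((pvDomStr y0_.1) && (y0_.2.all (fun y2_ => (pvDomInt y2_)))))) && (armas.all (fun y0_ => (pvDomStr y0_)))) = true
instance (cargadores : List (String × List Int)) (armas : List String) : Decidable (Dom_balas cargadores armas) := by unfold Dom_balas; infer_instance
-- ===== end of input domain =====

-- B inverts A's iteration: it sums sum(cargadores[w]) over the deduplicated weapon set
-- instead of collecting matching charger keys and summing afterwards (objective: simpler).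


-- ===== PORT A =====
def balas (cargadores : List (String × List Int)) (armas : List String) : Int :=
  let d := PySem.Dict.ofList cargadores
  let listacargadores := d.keys                 -- list(cargadores) = the dict's keys
  let listaparacomparar :=
    listacargadores.foldl (fun acc i => if armas.contains i then acc ++ [i] else acc) []
  listaparacomparar.foldl
    (fun total i => if d.contains i then total + (d.getD i []).sum else total) 0

-- ===== PORT B =====
def balas_alt (cargadores : List (String × List Int)) (armas : List String) : Int :=
  let d := PySem.Dict.ofList cargadores
  -- sum(sum(cargadores[w]) for w in set(armas) if w in cargadores)
  -- (summing ints over a set: the result does not depend on the set's iteration order)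
  ((((PySem.Set.ofList armas).filter (fun w => d.contains w)).map
      (fun w => (d.getD w []).sum)).sum)

-- ===== PRECONDITION & SPEC =====
def Spec_balas (cargadores : List (String × List Int)) (armas : List String) (out : Int) : Prop := out = balas_alt cargadores armas
instance (cargadores : List (String × List Int)) (armas : List String) (out : Int) : Decidable (Spec_balas cargadores armas out) := by unfold Spec_balas; infer_instance

-- ===== CLAIM (what is proved, stated in full; the proofs are below) =====
def Claim_equal_balas : Prop := ∀ (cargadores : List (String × List Int)) (armas : List String), Dom_balas cargadores armas → Spec_balas cargadores armas (balas cargadores armas)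

-- ===== LEMMAS AND PROOFS =====

-- A conditional-add loop is the sum over the filtered, mapped list.
theorem foldl_if_add {α : Type} (p : α → Bool) (f : α → Int) (l : List α) (t : Int) :
    l.foldl (fun t i => if p i then t + f i else t) t = t + ((l.filter p).map f).sum := by
  induction l generalizing t with
  | nil => simp
  | cons x xs ih =>
    by_cases h : p x = true <;> simp [List.foldl_cons, h, ih, add_assoc]

theorem balas_spec : Claim_equal_balas := by
  intro cargadores armas _
  unfold Spec_balas balas balas_alt
  set d := PySem.Dict.ofList cargadores with hd
  have h1 : List.foldl (fun acc i => if armas.contains i = true then acc ++ [i] else acc) [] d.keys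
      = d.keys.filter (fun i => armas.contains i) := by
    simpa using PySem.List.foldl_append_if (fun i => armas.contains i) (fun i => i) d.keys []
  rw [foldl_if_add, h1]
  simp only [zero_add]
  -- drop the inner `i in cargadores` filter: every element comes from d.keys
  have hsub : List.filter d.contains (d.keys.filter (fun i => armas.contains i))
      = d.keys.filter (fun i => armas.contains i) := by
    apply List.filter_eq_self.mpr
    intro a ha
    exact (PySem.Dict.contains_iff_mem_keys d a).mpr (List.mem_of_mem_filter ha)
  rw [hsub]
  -- the two key lists are permutations: both Nodup with the same membership
  have hperm : (d.keys.filter (fun i => armas.contains i)).Perm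
      ((PySem.Set.ofList armas).filter (fun w => d.contains w)) := by
    rw [List.perm_ext_iff_of_nodup
      ((PySem.Dict.nodup_keys_ofList cargadores).filter _)
      ((PySem.Set.nodup_ofList armas).filter _)]
    intro a
    simp only [List.mem_filter, PySem.Set.mem_ofList]
    constructor
    · rintro ⟨hk, ha⟩
      exact ⟨by simpa using ha, by simpa using (PySem.Dict.contains_iff_mem_keys d a).mpr hk⟩
    · rintro ⟨ha, hk⟩
      exact ⟨(PySem.Dict.contains_iff_mem_keys d a).mp (by simpa using hk), by simpa using ha⟩
  exact ((hperm.map _).sum_eq)
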